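-- pv_equiv track=rewrite | github.com/limsubinn/Algorithm | Programmers/LV2/pg72411.py | solution
-- ===== SOURCE A (Python) =====
-- from itertools import combinations
--
-- def solution(orders, course):
--     answer = []
--     for i in course:
--         result = {}
--         for j in orders:
--             # orders에서 course별로 해당 수 뽑아냄
--             c = list(combinations(j, i))
--             for k in c:
--                 # 알파벳 오름차순으로 정렬 후 문자열로 변환
--                 k = sorted(list(k))
--                 s = ''.join(k)
--                 # 딕셔너리에 추가 {문자열: 카운트}
--                 if s in result:
--                     result[s] += 1
--                 else:
--                     result[s] = 1
--
--         max_cnt = 0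
--         tmp = []
--         for key in result:
--             if result[key] < 2: # 2명 이하의 손님에게서 주문된 구성은 후보에 들어가지 않음
--                 continue
--
--             if result[key] > max_cnt: # 최댓값 갱신
--                 max_cnt = result[key]
--                 tmp = [key]
--             elif result[key] == max_cnt: # 동일한 최댓값 추가
--                 tmp.append(key)
--
--         for i in tmp: # 정답 배열에 추가
--             answer.append(i)
--
--     answer.sort() # 알파벳 오름차순으로 정렬
--     return answer
-- ===== SOURCE B (Python) =====
-- from itertools import combinations, groupby
--
--
-- def solution(orders, course):
--     answer = []
--     for r in course:
--         # every sorted-and-joined combination string of every order, sorted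
--         pool = sorted(''.join(sorted(c)) for order in orders for c in combinations(order, r))
--         # consecutive equal runs of the sorted pool: (string, run length)
--         runs = [(s, len(list(g))) for s, g in groupby(pool)]
--         best = max((c for _, c in runs if c >= 2), default=0)
--         if best >= 2:
--             answer.extend(s for s, c in runs if c == best)
--     answer.sort()
--     return answer
-- ===== Notes on version B (the rewrite author's own statement) =====
-- stated objective: alternative
-- what changed: B replaces A's incrementally built dict counter with inline max/candidate tracking by a sort-then-scan decomposition: all combination strings of a course size are collected into one list, sorted, consecutive equal runs are counted (groupby), and the winners are the runs whose length equals the maximum run length that reaches 2.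
import Mathlib
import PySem

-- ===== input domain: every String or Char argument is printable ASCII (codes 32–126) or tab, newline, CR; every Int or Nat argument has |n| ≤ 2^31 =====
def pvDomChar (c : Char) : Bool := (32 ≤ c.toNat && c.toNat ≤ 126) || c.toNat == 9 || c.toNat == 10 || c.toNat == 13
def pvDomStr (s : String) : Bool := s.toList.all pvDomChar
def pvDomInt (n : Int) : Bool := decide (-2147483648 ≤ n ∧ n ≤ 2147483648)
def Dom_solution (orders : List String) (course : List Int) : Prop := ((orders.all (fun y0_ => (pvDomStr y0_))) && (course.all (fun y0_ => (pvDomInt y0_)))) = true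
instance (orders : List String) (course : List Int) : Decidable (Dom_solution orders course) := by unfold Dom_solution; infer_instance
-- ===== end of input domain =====

-- B replaces A's dict counter + inline max tracking by sort-the-pooled-strings-then-count-runs; return values proved equal.

-- ===== PORT A =====
def solution (orders : List String) (course : List Int) : List String :=
  let answer : List String :=
    course.foldl (fun answer i =>
      let result : PySem.Dict String Int :=
        orders.foldl (fun result j =>
          let c := PySem.List.combinations j.toList i.toNat
          c.foldl (fun result k =>
            let k' := PySem.List.sorted k (fun x => x)
            let s := String.ofList k'
            if result.contains s then result.insert s (result.getD s 0 + 1)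
            else result.insert s 1) result) PySem.Dict.empty
      let mt :=
        result.keys.foldl (fun (p : Int × List String) key =>
          if result.getD key 0 < 2 then p
          else if p.1 < result.getD key 0 then (result.getD key 0, [key])
          else if result.getD key 0 = p.1 then (p.1, p.2 ++ [key])
          else p) ((0 : Int), ([] : List String))
      mt.2.foldl (fun answer s => answer ++ [s]) answer) []
  PySem.List.sorted answer (fun x => x)

-- ===== PORT B =====
-- itertools.groupby with the group sizes taken immediately: the consecutive equal
-- runs of the list as (value, run length) pairs (hand port; exact for a list of strings).
def pyGroupRuns : List String → List (String × Int)
  | [] => []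
  | x :: rest =>
      (x, 1 + ((rest.takeWhile (fun y => y == x)).length : Int)) ::
        pyGroupRuns (rest.dropWhile (fun y => y == x))
  termination_by l => l.length
  decreasing_by
    simp only [List.length_cons]
    exact Nat.lt_succ_of_le (List.length_dropWhile_le _ _)

def solution_alt (orders : List String) (course : List Int) : List String :=
  let answer : List String :=
    course.foldl (fun answer r =>
      let pool := PySem.List.sorted
        (orders.flatMap (fun od =>
          (PySem.List.combinations od.toList r.toNat).map
            (fun c => String.ofList (PySem.List.sorted c (fun x => x)))))
        (fun x => x)
      let runs := pyGroupRuns pool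
      let best := PySem.List.maxD
        ((runs.filter (fun p => decide ((2:Int) ≤ p.2))).map (fun p => p.2)) (fun x => x) 0
      if (2:Int) ≤ best then
        answer ++ (runs.filter (fun p => decide (p.2 = best))).map (fun p => p.1)
      else answer) []
  PySem.List.sorted answer (fun x => x)

-- ===== PRECONDITION & SPEC =====
-- Pre_ excludes exactly the inputs on which the Python A raises: with a non-empty
-- orders list, itertools.combinations raises ValueError for a negative course entry
-- (B raises there as well; with orders = [] the inner loop never runs and both return).
def Pre_solution (orders : List String) (course : List Int) : Prop :=
  orders = [] ∨ ∀ i ∈ course, 0 ≤ i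
instance (orders : List String) (course : List Int) : Decidable (Pre_solution orders course) := by
  unfold Pre_solution; infer_instance
def pvWitness_solution : List String × List Int := (["AB", "ABC", "B"], [1, 2])
def Spec_solution (orders : List String) (course : List Int) (out : List String) : Prop := out = solution_alt orders course
instance (orders : List String) (course : List Int) (out : List String) : Decidable (Spec_solution orders course out) := by unfold Spec_solution; infer_instance

-- ===== CLAIM (what is proved, stated in full; the proofs are below) =====
def Claim_equal_solution : Prop := ∀ (orders : List String) (course : List Int), Dom_solution orders course → Pre_solution orders course → Spec_solution orders course (solution orders course)

-- ===== LEMMAS AND PROOFS =====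

-- the pooled combination strings of one course size (shared vocabulary of the proofs)
def pvPool (orders : List String) (n : Nat) : List String :=
  orders.flatMap (fun od =>
    (PySem.List.combinations od.toList n).map
      (fun c => String.ofList (PySem.List.sorted c (fun x => x))))
def pvCnt (pool : List String) (k : String) : Int := (pool.count k : Int)
def pvMaxStep (cnt : String → Int) (a : Int) (k : String) : Int :=
  if cnt k < 2 then a else if a < cnt k then cnt k else a
def pvM (pool : List String) : Int := (PySem.Set.ofList pool).foldl (pvMaxStep (pvCnt pool)) 0
-- what A contributes to the answer for one course size
def pvTmpA (pool : List String) : List String :=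
  (PySem.Set.ofList pool).filter
    (fun k => decide (pvCnt pool k = pvM pool) && decide (2 ≤ pvCnt pool k))
-- what B contributes to the answer for one course size
def pvB (pool : List String) : List String :=
  let runs := pyGroupRuns (PySem.List.sorted pool (fun x => x))
  let best := PySem.List.maxD
    ((runs.filter (fun p => decide ((2:Int) ≤ p.2))).map (fun p => p.2)) (fun x => x) 0
  if (2:Int) ≤ best then (runs.filter (fun p => decide (p.2 = best))).map (fun p => p.1)
  else []
-- the distinct strings of the pool with their multiplicities
def pvItems (pool : List String) : List (String × Int) :=
  (PySem.Set.ofList pool).map (fun k => (k, pvCnt pool k))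

-- a fold over a flatMap is the nested fold
theorem pv_foldl_flatMap {α β γ : Type} (g : α → List β) (f : γ → β → γ) (l : List α) (i : γ) :
    (l.flatMap g).foldl f i = l.foldl (fun a x => (g x).foldl f a) i := by
  induction l generalizing i with
  | nil => rfl
  | cons x t ih => simp [List.flatMap_cons, List.foldl_append, ih]

-- A's dict after the nested counting loops is Counter(pool)
theorem pv_dictA_eq_counter (orders : List String) (n : Nat) :
    orders.foldl (fun result j =>
        (PySem.List.combinations j.toList n).foldl (fun result k =>
          let k' := PySem.List.sorted k (fun x => x)
          let s := String.ofList k'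
          if result.contains s then result.insert s (result.getD s 0 + 1)
          else result.insert s 1) result) PySem.Dict.empty
      = PySem.Dict.counter (pvPool orders n) := by
  have hstep : ∀ (d : PySem.Dict String Int) (s : String),
      (if d.contains s then d.insert s (d.getD s 0 + 1) else d.insert s 1)
        = d.insert s (d.getD s 0 + 1) := by
    intro d s
    by_cases h : d.contains s
    · simp [h]
    · have h0 : d.getD s 0 = 0 := by
        unfold PySem.Dict.getD
        rw [(PySem.Dict.get?_eq_none_iff_not_mem_keys d s).mpr ?_]
        · rfl
        · simp [pysem] at h ⊢; exact h
      simp [h, h0]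
  rw [← PySem.Dict.foldl_insert_getD_add_one_eq_counter, pvPool, pv_foldl_flatMap]
  apply PySem.List.foldl_congr_mem
  intro d j hj
  rw [List.foldl_map]
  apply PySem.List.foldl_congr_mem
  intro d' k hk
  exact hstep d' (String.ofList (PySem.List.sorted k (fun x => x)))

-- the running max in A's scan only grows
theorem pv_maxStep_le (cnt : String → Int) (ks : List String) (m : Int) :
    m ≤ ks.foldl (pvMaxStep cnt) m := by
  induction ks generalizing m with
  | nil => simp
  | cons k t ih =>
    refine le_trans ?_ (ih (pvMaxStep cnt m k))
    unfold pvMaxStep; split_ifs <;> omega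

-- A's max/tmp scan characterised: final pair = (final max, keys whose count equals it and reaches 2)
theorem pv_scan_spec (cnt : String → Int) (ks : List String) (m : Int) (t : List String) :
    ks.foldl (fun (p : Int × List String) key =>
        if cnt key < 2 then p
        else if p.1 < cnt key then (cnt key, [key])
        else if cnt key = p.1 then (p.1, p.2 ++ [key])
        else p) (m, t)
      = (ks.foldl (pvMaxStep cnt) m,
         (if ks.foldl (pvMaxStep cnt) m = m then t else []) ++
           ks.filter (fun k => decide (cnt k = ks.foldl (pvMaxStep cnt) m) && decide (2 ≤ cnt k))) := by
  induction ks generalizing m t with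
  | nil => simp
  | cons k ks ih =>
    simp only [List.foldl_cons, List.filter_cons]
    by_cases h1 : cnt k < 2
    · have hms : pvMaxStep cnt m k = m := by unfold pvMaxStep; rw [if_pos h1]
      rw [if_pos h1]
      simp only [hms]
      rw [ih]
      have hb : (decide (cnt k = ks.foldl (pvMaxStep cnt) m) && decide (2 ≤ cnt k)) = false := by
        simp; omega
      simp only [hb, Bool.false_eq_true, if_false]
    · rw [if_neg h1]
      by_cases h2 : m < cnt k
      · have hms : pvMaxStep cnt m k = cnt k := by unfold pvMaxStep; rw [if_neg h1, if_pos h2]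
        rw [if_pos h2]
        simp only [hms]
        rw [ih]
        have hle : cnt k ≤ ks.foldl (pvMaxStep cnt) (cnt k) := pv_maxStep_le cnt ks (cnt k)
        have hne : ks.foldl (pvMaxStep cnt) (cnt k) ≠ m := by omega
        rw [if_neg hne]
        by_cases h3 : cnt k = ks.foldl (pvMaxStep cnt) (cnt k)
        · have hb : (decide (cnt k = ks.foldl (pvMaxStep cnt) (cnt k)) && decide (2 ≤ cnt k)) = true := by
            simp; exact ⟨h3, by omega⟩
          simp only [hb, if_true, if_pos h3.symm]
          simp
        · have hb : (decide (cnt k = ks.foldl (pvMaxStep cnt) (cnt k)) && decide (2 ≤ cnt k)) = false := by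
            simp; intro h; omega
          simp only [hb, Bool.false_eq_true, if_false]
          rw [if_neg (show ¬ List.foldl (pvMaxStep cnt) (cnt k) ks = cnt k by omega)]
      · have hms : pvMaxStep cnt m k = m := by unfold pvMaxStep; rw [if_neg h1, if_neg h2]
        rw [if_neg h2]
        by_cases h3 : cnt k = m
        · rw [if_pos h3]
          simp only [hms]
          rw [ih]
          by_cases h4 : ks.foldl (pvMaxStep cnt) m = m
          · have hb : (decide (cnt k = ks.foldl (pvMaxStep cnt) m) && decide (2 ≤ cnt k)) = true := by
              simp; exact ⟨by omega, by omega⟩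
            simp only [hb, if_true, if_pos h4]
            simp
          · have hb : (decide (cnt k = ks.foldl (pvMaxStep cnt) m) && decide (2 ≤ cnt k)) = false := by
              simp; intro h; omega
            simp only [hb, Bool.false_eq_true, if_false, if_neg h4]
        · rw [if_neg h3]
          simp only [hms]
          rw [ih]
          have hle : m ≤ ks.foldl (pvMaxStep cnt) m := pv_maxStep_le cnt ks m
          have hb : (decide (cnt k = ks.foldl (pvMaxStep cnt) m) && decide (2 ≤ cnt k)) = false := by
            simp; intro h; omega
          simp only [hb, Bool.false_eq_true, if_false]

-- the head of a dropWhile fails the test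
theorem pv_dropWhile_head_false {α : Type} (p : α → Bool) (l : List α) (h : α) (t : List α)
    (e : l.dropWhile p = h :: t) : p h = false := by
  induction l with
  | nil => simp at e
  | cons a l ih =>
    rw [List.dropWhile_cons] at e
    by_cases hp : p a
    · rw [if_pos hp] at e; exact ih e
    · rw [if_neg hp] at e
      cases e
      simpa using hp

-- in a sorted list, nothing after the leading run of x equals x
theorem pv_not_mem_dropWhile (x : String) (rest : List String)
    (hp : rest.Pairwise (· ≤ ·)) (hx : ∀ y ∈ rest, x ≤ y) :
    x ∉ rest.dropWhile (fun y => y == x) := by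
  intro hmem
  cases e : rest.dropWhile (fun y => y == x) with
  | nil => rw [e] at hmem; simp at hmem
  | cons h t =>
    have hne : (h == x) = false := pv_dropWhile_head_false (fun y => y == x) rest h t e
    have hhmem : h ∈ rest := (List.dropWhile_sublist _).mem (by rw [e]; simp)
    have hxh : x < h := lt_of_le_of_ne (hx h hhmem) (fun hh => by simp [hh.symm] at hne)
    have hpdw : (h :: t).Pairwise (· ≤ ·) := e ▸ List.Pairwise.sublist (List.dropWhile_sublist _) hp
    rw [e] at hmem
    rcases List.mem_cons.mp hmem with h1 | h2
    · exact absurd h1 (ne_of_lt hxh)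
    · have : h ≤ x := (List.pairwise_cons.mp hpdw).1 x h2
      exact absurd (lt_of_lt_of_le hxh this) (lt_irrefl x)

-- membership in the runs of a sorted list: run lengths are the counts
theorem pv_runs_mem (l : List String) (hl : l.Pairwise (· ≤ ·)) (v : String) (c : Int) :
    (v, c) ∈ pyGroupRuns l ↔ v ∈ l ∧ c = (l.count v : Int) := by
  induction l using pyGroupRuns.induct with
  | case1 => simp [pyGroupRuns]
  | case2 x rest ih =>
    have hx : ∀ y ∈ rest, x ≤ y := fun y hy => (List.pairwise_cons.mp hl).1 y hy
    have hrest : rest.Pairwise (· ≤ ·) := (List.pairwise_cons.mp hl).2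
    have hdw : (rest.dropWhile (fun y => y == x)).Pairwise (· ≤ ·) :=
      List.Pairwise.sublist (List.dropWhile_sublist _) hrest
    have hnx : x ∉ rest.dropWhile (fun y => y == x) := pv_not_mem_dropWhile x rest hrest hx
    have htw : ∀ y ∈ rest.takeWhile (fun y => y == x), y = x := by
      intro y hy; simpa using List.mem_takeWhile_imp hy
    have h1 : (rest.takeWhile (fun y => y == x)).count x = (rest.takeWhile (fun y => y == x)).length :=
      List.count_eq_length.mpr (fun b hb => (htw b hb).symm)
    have h2 : (rest.dropWhile (fun y => y == x)).count x = 0 := List.count_eq_zero.mpr hnx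
    have hr : rest.count x = (rest.takeWhile (fun y => y == x)).length := by
      conv_lhs => rw [← List.takeWhile_append_dropWhile (p := fun y => y == x) (l := rest)]
      rw [List.count_append, h1, h2]; omega
    have hcx : (x :: rest).count x = 1 + (rest.takeWhile (fun y => y == x)).length := by
      rw [List.count_cons_self, hr]; omega
    have hcv : ∀ v : String, v ≠ x →
        (x :: rest).count v = (rest.dropWhile (fun y => y == x)).count v := by
      intro v hvx
      rw [List.count_cons_of_ne (Ne.symm hvx)]
      conv_lhs => rw [← List.takeWhile_append_dropWhile (p := fun y => y == x) (l := rest)]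
      rw [List.count_append, List.count_eq_zero.mpr (fun hm => hvx (htw v hm))]
      omega
    rw [pyGroupRuns]
    simp only [List.mem_cons, Prod.mk.injEq]
    constructor
    · rintro (⟨rfl, rfl⟩ | hmem)
      · exact ⟨Or.inl rfl, by rw [hcx]; push_cast; ring⟩
      · have hh := (ih hdw).mp hmem
        refine ⟨Or.inr ((List.dropWhile_sublist _).mem hh.1), ?_⟩
        have hvx : v ≠ x := fun h => hnx (h ▸ hh.1)
        rw [hh.2]
        congr 1
        exact (hcv v hvx).symm
    · rintro ⟨hmem, rfl⟩
      by_cases hvx : v = x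
      · subst hvx
        left
        exact ⟨rfl, by rw [hcx]; push_cast; ring⟩
      · right
        have hvrest : v ∈ rest := by
          rcases hmem with h | h
          · exact absurd h hvx
          · exact h
        have hvdw : v ∈ rest.dropWhile (fun y => y == x) := by
          have hsplit : v ∈ rest.takeWhile (fun y => y == x) ∨ v ∈ rest.dropWhile (fun y => y == x) := by
            rw [← List.mem_append, List.takeWhile_append_dropWhile]; exact hvrest
          rcases hsplit with h | h
          · exact absurd (htw v h) hvx
          · exact h
        rw [ih hdw]
        exact ⟨hvdw, by rw [hcv v hvx]⟩

-- the run values of a sorted list are distinct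
theorem pv_runs_nodup (l : List String) (hl : l.Pairwise (· ≤ ·)) :
    ((pyGroupRuns l).map Prod.fst).Nodup := by
  induction l using pyGroupRuns.induct with
  | case1 => simp [pyGroupRuns]
  | case2 x rest ih =>
    have hx : ∀ y ∈ rest, x ≤ y := fun y hy => (List.pairwise_cons.mp hl).1 y hy
    have hrest : rest.Pairwise (· ≤ ·) := (List.pairwise_cons.mp hl).2
    have hdw : (rest.dropWhile (fun y => y == x)).Pairwise (· ≤ ·) :=
      List.Pairwise.sublist (List.dropWhile_sublist _) hrest
    have hnx : x ∉ rest.dropWhile (fun y => y == x) := pv_not_mem_dropWhile x rest hrest hx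
    rw [pyGroupRuns]
    simp only [List.map_cons, List.nodup_cons]
    refine ⟨?_, ih hdw⟩
    intro hmem
    rcases List.mem_map.mp hmem with ⟨⟨v, c⟩, hvc, hv⟩
    cases hv
    exact hnx ((pv_runs_mem _ hdw _ _).mp hvc).1

-- B's max over the ≥2-filtered count list equals A's running max, given a permutation
theorem pv_maxD_eq_foldl (LA LB : List Int) (hperm : LA.Perm LB)
    (h2 : ∀ y ∈ LA, 2 ≤ y) :
    PySem.List.maxD LB (fun x => x) 0 = LA.foldl max 0 := by
  unfold PySem.List.maxD
  cases hB : PySem.List.max? LB (fun x => x) with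
  | none =>
    have hBnil : LB = [] := (PySem.List.max?_eq_none_iff _ _).mp hB
    have : LA = [] := List.Perm.eq_nil (hBnil ▸ hperm)
    simp [this]
  | some m =>
    have hmem : m ∈ LB := PySem.List.max?_mem hB
    have hmax : ∀ y ∈ LB, y ≤ m := by
      intro y hy; exact PySem.List.max?_isMax hB y hy
    have hmemA : m ∈ LA := hperm.mem_iff.mpr hmem
    have hfold := PySem.List.le_foldl_max LA 0
    have hasm : m ≤ LA.foldl max 0 := hfold.2 m hmemA
    have hor : LA.foldl max 0 = 0 ∨ LA.foldl max 0 ∈ LA := PySem.List.foldl_max_mem LA 0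
    rcases hor with h | h
    · have : 2 ≤ m := h2 m hmemA
      omega
    · have : LA.foldl max 0 ≤ m := hmax _ (hperm.mem_iff.mp h)
      simp only [Option.getD]
      omega

-- the runs of the sorted pool are, up to order, the distinct strings with their counts
theorem pv_runs_perm_items (pool : List String) :
    (pyGroupRuns (PySem.List.sorted pool (fun x => x))).Perm (pvItems pool) := by
  set sp := PySem.List.sorted pool (fun x => x) with hsp
  have hpw : sp.Pairwise (· ≤ ·) := PySem.List.sorted_pairwise pool (fun x => x)
  have hpp : sp.Perm pool := PySem.List.sorted_perm pool (fun x => x) false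
  have hni : (pvItems pool).Nodup := by
    apply List.Nodup.of_map Prod.fst
    have : (pvItems pool).map Prod.fst = PySem.Set.ofList pool := by
      unfold pvItems; rw [List.map_map]
      rw [show (Prod.fst ∘ fun k => (k, pvCnt pool k)) = id from rfl, List.map_id]
    rw [this]
    exact PySem.Set.nodup_ofList pool
  have hnr : (pyGroupRuns sp).Nodup := List.Nodup.of_map Prod.fst (pv_runs_nodup sp hpw)
  rw [List.perm_ext_iff_of_nodup hnr hni]
  rintro ⟨v, c⟩
  rw [pv_runs_mem sp hpw v c]
  unfold pvItems
  constructor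
  · rintro ⟨hv, rfl⟩
    rw [List.mem_map]
    refine ⟨v, ?_, ?_⟩
    · rw [PySem.Set.mem_ofList]; exact hpp.mem_iff.mp hv
    · unfold pvCnt; rw [hpp.count_eq]
  · intro hm
    rcases List.mem_map.mp hm with ⟨k, hk, hkeq⟩
    obtain ⟨rfl, rfl⟩ : k = v ∧ pvCnt pool k = c := by
      injection hkeq with h1 h2; exact ⟨h1, h2⟩
    constructor
    · exact hpp.mem_iff.mpr ((PySem.Set.mem_ofList pool k).mp hk)
    · unfold pvCnt; rw [hpp.count_eq]

theorem pv_filter_items (pool : List String) (p : String × Int → Bool) :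
    (pvItems pool).filter p
      = ((PySem.Set.ofList pool).filter (fun k => p (k, pvCnt pool k))).map
          (fun k => (k, pvCnt pool k)) := by
  unfold pvItems
  rw [List.filter_map]
  rfl

theorem pv_M_eq_foldl_max (pool : List String) :
    pvM pool = (((PySem.Set.ofList pool).filter (fun k => decide (2 ≤ pvCnt pool k))).map
        (pvCnt pool)).foldl max 0 := by
  unfold pvM
  have hcong : ∀ (a : Int) (k : String), k ∈ PySem.Set.ofList pool →
      pvMaxStep (pvCnt pool) a k = if 2 ≤ pvCnt pool k then max a (pvCnt pool k) else a := by
    intro a k _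
    unfold pvMaxStep
    rcases lt_or_ge (pvCnt pool k) 2 with h | h
    · rw [if_pos h, if_neg (by omega)]
    · rw [if_neg (by omega), if_pos h]
      rcases lt_or_ge a (pvCnt pool k) with h2 | h2
      · rw [if_pos h2, max_eq_right (le_of_lt h2)]
      · rw [if_neg (by omega), max_eq_left h2]
  refine (PySem.List.foldl_congr_mem _ _ _ _ hcong).trans ?_
  rw [PySem.List.foldl_ite_eq_foldl_filter (p := fun k => 2 ≤ pvCnt pool k)
      (f := fun a k => max a (pvCnt pool k)), List.foldl_map]

-- what A and B contribute for one course size agree up to order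
theorem pv_course_perm (pool : List String) : (pvTmpA pool).Perm (pvB pool) := by
  unfold pvB
  simp only []
  have hri := pv_runs_perm_items pool
  set runs := pyGroupRuns (PySem.List.sorted pool (fun x => x)) with hruns
  have hLB : ((runs.filter (fun p => decide ((2:Int) ≤ p.2))).map (fun p => p.2)).Perm
      (((PySem.Set.ofList pool).filter (fun k => decide (2 ≤ pvCnt pool k))).map (pvCnt pool)) := by
    refine List.Perm.trans (List.Perm.map _ (hri.filter _)) ?_
    rw [pv_filter_items pool (fun p => decide ((2:Int) ≤ p.2)), List.map_map]
    rfl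
  have hbest : PySem.List.maxD
      ((runs.filter (fun p => decide ((2:Int) ≤ p.2))).map (fun p => p.2)) (fun x => x) 0
      = pvM pool := by
    rw [pv_M_eq_foldl_max]
    apply pv_maxD_eq_foldl _ _ hLB.symm
    intro y hy
    rcases List.mem_map.mp hy with ⟨k, hk, rfl⟩
    have := (List.mem_filter.mp hk).2
    simpa using this
  rw [hbest]
  by_cases h2 : (2:Int) ≤ pvM pool
  · rw [if_pos h2]
    unfold pvTmpA
    have hA : (PySem.Set.ofList pool).filter
        (fun k => decide (pvCnt pool k = pvM pool) && decide (2 ≤ pvCnt pool k))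
        = (PySem.Set.ofList pool).filter (fun k => decide (pvCnt pool k = pvM pool)) := by
      apply List.filter_congr
      intro k _
      by_cases hk : pvCnt pool k = pvM pool
      · simp [hk]; omega
      · simp [hk]
    rw [hA]
    refine List.Perm.trans ?_ (List.Perm.map _ (hri.filter _)).symm
    rw [pv_filter_items pool (fun p => decide (p.2 = pvM pool)), List.map_map]
    rw [show ((fun p => p.1) ∘ fun k => (k, pvCnt pool k)) = id from rfl, List.map_id]
  · rw [if_neg h2]
    unfold pvTmpA
    rw [List.filter_eq_nil_iff.mpr ?_]
    intro k _
    by_cases hk : pvCnt pool k = pvM pool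
    · simp [hk]; omega
    · simp [hk]

-- one step of A's outer loop appends pvTmpA of the pool
theorem pv_stepA (orders : List String) (acc : List String) (i : Int) :
    (let result : PySem.Dict String Int :=
        orders.foldl (fun result j =>
          let c := PySem.List.combinations j.toList i.toNat
          c.foldl (fun result k =>
            let k' := PySem.List.sorted k (fun x => x)
            let s := String.ofList k'
            if result.contains s then result.insert s (result.getD s 0 + 1)
            else result.insert s 1) result) PySem.Dict.empty
     let mt :=
        result.keys.foldl (fun (p : Int × List String) key =>
          if result.getD key 0 < 2 then p
          else if p.1 < result.getD key 0 then (result.getD key 0, [key])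
          else if result.getD key 0 = p.1 then (p.1, p.2 ++ [key])
          else p) ((0 : Int), ([] : List String))
     mt.2.foldl (fun answer s => answer ++ [s]) acc)
    = acc ++ pvTmpA (pvPool orders i.toNat) := by
  simp only []
  rw [pv_dictA_eq_counter orders i.toNat]
  simp only [PySem.Dict.getD_counter, PySem.Dict.keys_counter]
  rw [pv_scan_spec (fun k => ((pvPool orders i.toNat).count k : Int))]
  rw [PySem.List.foldl_append_singleton_eq_self]
  unfold pvTmpA pvM pvCnt
  simp

-- one step of B's outer loop appends pvB of the pool
theorem pv_stepB (orders : List String) (acc : List String) (r : Int) :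
    (let pool := PySem.List.sorted
        (orders.flatMap (fun od =>
          (PySem.List.combinations od.toList r.toNat).map
            (fun c => String.ofList (PySem.List.sorted c (fun x => x)))))
        (fun x => x)
     let runs := pyGroupRuns pool
     let best := PySem.List.maxD
        ((runs.filter (fun p => decide ((2:Int) ≤ p.2))).map (fun p => p.2)) (fun x => x) 0
     if (2:Int) ≤ best then
        acc ++ (runs.filter (fun p => decide (p.2 = best))).map (fun p => p.1)
     else acc)
    = acc ++ pvB (pvPool orders r.toNat) := by
  simp only []
  unfold pvB pvPool
  simp only []
  split_ifs with h
  · rfl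
  · simp

theorem pv_flatMap_perm {α β : Type} (l : List α) (f g : α → List β)
    (h : ∀ x ∈ l, (f x).Perm (g x)) : (l.flatMap f).Perm (l.flatMap g) := by
  induction l with
  | nil => simp
  | cons x t ih =>
    simp only [List.flatMap_cons]
    exact (h x (by simp)).append (ih (fun y hy => h y (by simp [hy])))

-- ===== VERDICT (by name: the statement is the Claim_ definition above) =====
set_option maxHeartbeats 1000000 in
theorem solution_spec : Claim_equal_solution := by
  intro orders course _ _
  unfold Spec_solution solution solution_alt
  simp only []
  rw [PySem.List.foldl_congr_mem _ _
        (fun acc i => acc ++ pvTmpA (pvPool orders i.toNat)) _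
        (fun acc i _ => pv_stepA orders acc i),
      PySem.List.foldl_congr_mem _ _
        (fun acc r => acc ++ pvB (pvPool orders r.toNat)) _
        (fun acc r _ => pv_stepB orders acc r),
      PySem.List.foldl_append_eq_flatMap, PySem.List.foldl_append_eq_flatMap]
  simp only [List.nil_append]
  exact PySem.List.sorted_eq_sorted_of_perm _ _ _ (fun a b h => h)
    (pv_flatMap_perm course _ _ (fun i _ => pv_course_perm (pvPool orders i.toNat)))
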